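-- pv_equiv track=rewrite | github.com/guch8017/Table-Detector-PyTorch | builder.py | table_line_cor
-- ===== SOURCE A (Python) =====
-- def table_line_cor(lines, axis='col', interval=10):
--
--     if axis == 'col':
--         edges = [[line[1], line[3]] for line in lines]
--     else:
--         edges = [[line[0], line[2]] for line in lines]
--
--     edges = sum(edges, [])
--     edges = sorted(edges)
--
--     n_edges = len(edges)
--     edges_map = {}
--     for i in range(n_edges):
--         if i == 0:
--             edges_map[edges[i]] = edges[i]
--             continue
--         else:
--             if edges[i] - edges_map[edges[i - 1]] < interval:
--                 edges_map[edges[i]] = edges_map[edges[i - 1]]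
--             else:
--                 edges_map[edges[i]] = edges[i]
--
--     edges_map_list = [[key, edges_map[key]] for key in edges_map]
--     edges_map_index = [line[1] for line in edges_map_list]
--     edges_map_index = list(set(edges_map_index))
--     edges_map_index = {x: ind for ind, x in enumerate(sorted(edges_map_index))}
--     ind2edges = {ind: x for x, ind in edges_map_index.items()}
--
--     if axis == 'col':
--         cor = [[edges_map_index[edges_map[line[1]]], edges_map_index[edges_map[line[3]]]] for line in lines]
--     else:
--         cor = [[edges_map_index[edges_map[line[0]]], edges_map_index[edges_map[line[2]]]] for line in lines]
--     return cor, ind2edges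
-- ===== SOURCE B (Python) =====
-- # B clusters by partitioning the sorted distinct coordinates into maximal blocks,
-- # finding each block's right boundary by binary search (hand-written: A imports nothing,
-- # so bisect may not be imported); both dicts then fall out of the enumerated blocks.
-- def _bisect_left(a, x, lo, hi):
--     while lo < hi:
--         mid = (lo + hi) // 2
--         if a[mid] < x:
--             lo = mid + 1
--         else:
--             hi = mid
--     return lo
--
--
-- def table_line_cor(lines, axis='col', interval=10):
--     i, j = (1, 3) if axis == 'col' else (0, 2)
--     vals = sorted({c for line in lines for c in (line[i], line[j])})
--     blocks = []
--     lo = 0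
--     while lo < len(vals):
--         hi = _bisect_left(vals, vals[lo] + interval, lo + 1, len(vals))
--         blocks.append(vals[lo:hi])
--         lo = hi
--     val2idx = {v: k for k, blk in enumerate(blocks) for v in blk}
--     ind2edges = {k: blk[0] for k, blk in enumerate(blocks)}
--     return [[val2idx[line[i]], val2idx[line[j]]] for line in lines], ind2edges
-- ===== Notes on version B (the rewrite author's own statement) =====
-- stated objective: alternative
-- what changed: A chains per-element representatives through a dict over the sorted duplicated coordinate list and then collects, set-dedups, re-sorts and enumerates the representatives; B never builds a representative chain: it partitions the sorted distinct coordinates into maximal cluster blocks, locating each block's right boundary (first value >= block head + interval) by binary search, and reads both output dictionaries directly off the enumerated blocks.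
import Mathlib
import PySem

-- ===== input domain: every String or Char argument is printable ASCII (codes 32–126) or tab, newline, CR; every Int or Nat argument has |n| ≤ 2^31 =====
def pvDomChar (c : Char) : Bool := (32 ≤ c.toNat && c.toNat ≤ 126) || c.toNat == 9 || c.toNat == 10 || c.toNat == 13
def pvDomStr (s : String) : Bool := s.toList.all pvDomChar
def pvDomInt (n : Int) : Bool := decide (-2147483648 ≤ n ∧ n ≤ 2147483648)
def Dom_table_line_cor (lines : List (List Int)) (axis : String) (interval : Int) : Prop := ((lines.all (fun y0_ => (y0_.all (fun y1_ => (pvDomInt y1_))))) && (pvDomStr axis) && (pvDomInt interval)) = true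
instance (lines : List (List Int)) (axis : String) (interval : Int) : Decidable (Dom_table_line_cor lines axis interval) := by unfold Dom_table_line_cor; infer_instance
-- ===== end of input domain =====

-- B replaces A's representative-chain dict + collect/set-dedup/re-sort/enumerate pipeline by
-- partitioning the sorted distinct coordinates into maximal blocks, finding each block's right
-- boundary by binary search; objective: alternative algorithm of similar cost.


-- ===== PORT A =====
def table_line_cor (lines : List (List Int)) (axis : String) (interval : Int) :
    List (List Int) × (List (Int × Int)) :=
  let edges : List (List Int) :=
    if axis = "col" then
      lines.map (fun line => [PySem.List.pyGetD line 1 0, PySem.List.pyGetD line 3 0])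
    else
      lines.map (fun line => [PySem.List.pyGetD line 0 0, PySem.List.pyGetD line 2 0])
  let edgesFlat : List Int := edges.foldl (fun acc e => acc ++ e) []   -- sum(edges, [])
  let edgesS : List Int := PySem.List.sorted edgesFlat (fun x => x) false
  let nEdges : Int := (edgesS.length : Int)
  let edgesMap : PySem.Dict Int Int :=
    (PySem.List.pyRange 0 nEdges 1).foldl
      (fun m i =>
        if i = 0 then
          m.insert (PySem.List.pyGetD edgesS i 0) (PySem.List.pyGetD edgesS i 0)
        else if PySem.List.pyGetD edgesS i 0 - m.getD (PySem.List.pyGetD edgesS (i - 1) 0) 0 < interval then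
          m.insert (PySem.List.pyGetD edgesS i 0) (m.getD (PySem.List.pyGetD edgesS (i - 1) 0) 0)
        else
          m.insert (PySem.List.pyGetD edgesS i 0) (PySem.List.pyGetD edgesS i 0))
      PySem.Dict.empty
  let edgesMapList : List (List Int) := edgesMap.keys.map (fun k => [k, edgesMap.getD k 0])
  let edgesMapIndexL : List Int := edgesMapList.map (fun line => PySem.List.pyGetD line 1 0)
  let edgesMapIndexS : List Int := PySem.Set.ofList edgesMapIndexL   -- list(set(..)), consumed only by sorted
  let edgesMapIndex : PySem.Dict Int Int :=
    (PySem.List.enumerate (PySem.List.sorted edgesMapIndexS (fun x => x) false) 0).foldl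
      (fun d p => d.insert p.2 p.1) PySem.Dict.empty
  let ind2edges : PySem.Dict Int Int :=
    edgesMapIndex.items.foldl (fun d p => d.insert p.2 p.1) PySem.Dict.empty
  let cor : List (List Int) :=
    if axis = "col" then
      lines.map (fun line =>
        [edgesMapIndex.getD (edgesMap.getD (PySem.List.pyGetD line 1 0) 0) 0,
         edgesMapIndex.getD (edgesMap.getD (PySem.List.pyGetD line 3 0) 0) 0])
    else
      lines.map (fun line =>
        [edgesMapIndex.getD (edgesMap.getD (PySem.List.pyGetD line 0 0) 0) 0,
         edgesMapIndex.getD (edgesMap.getD (PySem.List.pyGetD line 2 0) 0) 0])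
  (cor, ind2edges.items)

-- ===== PORT B =====
-- B-side helpers: Source B hand-writes bisect_left (A imports no modules, so Source B may not import
-- bisect); _bisect_left's while loop and the block-collecting while loop become the two
-- recursions below, exact transliterations with a fuel bound that only makes them total
-- (fuel ≥ hi - lo resp. ≥ len - lo always holds at every call, so the 0-fuel branch is dead).
def bisectLeft (a : List Int) (x : Int) (fuel lo hi : Nat) : Nat :=
  match fuel with
  | 0 => lo
  | fuel + 1 =>
      if lo < hi then
        let mid := (lo + hi) / 2
        if PySem.List.pyGetD a (mid : Int) 0 < x then bisectLeft a x fuel (mid + 1) hi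
        else bisectLeft a x fuel lo mid
      else lo

def blocksLoop (vals : List Int) (t : Int) (fuel lo : Nat) : List (List Int) :=
  match fuel with
  | 0 => []
  | fuel + 1 =>
      if lo < vals.length then
        let hi := bisectLeft vals (PySem.List.pyGetD vals (lo : Int) 0 + t) vals.length
          (lo + 1) vals.length
        PySem.List.slice vals (some (lo : Int)) (some (hi : Int)) :: blocksLoop vals t fuel hi
      else []

def table_line_cor_alt (lines : List (List Int)) (axis : String) (interval : Int) :
    List (List Int) × (List (Int × Int)) :=
  let ij : Int × Int := if axis = "col" then (1, 3) else (0, 2)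
  let vals : List Int :=
    PySem.List.sorted
      (PySem.Set.ofList (lines.flatMap (fun line =>
        [PySem.List.pyGetD line ij.1 0, PySem.List.pyGetD line ij.2 0])))
      (fun x => x) false
  let blocks : List (List Int) := blocksLoop vals interval vals.length 0
  let val2idx : PySem.Dict Int Int :=
    (PySem.List.enumerate blocks 0).foldl
      (fun d p => p.2.foldl (fun d v => d.insert v p.1) d) PySem.Dict.empty
  let ind2edges : PySem.Dict Int Int :=
    (PySem.List.enumerate blocks 0).foldl
      (fun d p => d.insert p.1 (PySem.List.pyGetD p.2 0 0)) PySem.Dict.empty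
  (lines.map (fun line =>
    [val2idx.getD (PySem.List.pyGetD line ij.1 0) 0,
     val2idx.getD (PySem.List.pyGetD line ij.2 0) 0]), ind2edges.items)

-- ===== PRECONDITION & SPEC =====
-- Pre_ excludes exactly the inputs on which Python A raises IndexError: a line shorter than the
-- indices the chosen axis reads (indices 1,3 for axis 'col', else 0,2).
def Pre_table_line_cor (lines : List (List Int)) (axis : String) (interval : Int) : Prop :=
  ∀ line ∈ lines, (if axis = "col" then 4 else 3) ≤ line.length
instance (lines : List (List Int)) (axis : String) (interval : Int) : Decidable (Pre_table_line_cor lines axis interval) := by unfold Pre_table_line_cor; infer_instance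

def pvWitness_table_line_cor : List (List Int) × String × Int :=
  ([[0, 1, 2, 3], [5, 11, 6, 13], [7, 30, 8, 41]], "col", 10)

def Spec_table_line_cor (lines : List (List Int)) (axis : String) (interval : Int) (out : List (List Int) × (List (Int × Int))) : Prop := out = table_line_cor_alt lines axis interval
instance (lines : List (List Int)) (axis : String) (interval : Int) (out : List (List Int) × (List (Int × Int))) : Decidable (Spec_table_line_cor lines axis interval out) := by unfold Spec_table_line_cor; infer_instance

-- ===== CLAIM (what is proved, stated in full; the proofs are below) =====
def Claim_equal_table_line_cor : Prop := ∀ (lines : List (List Int)) (axis : String) (interval : Int), Dom_table_line_cor lines axis interval → Pre_table_line_cor lines axis interval → Spec_table_line_cor lines axis interval (table_line_cor lines axis interval)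

-- ===== LEMMAS AND PROOFS =====

-- dedup of a (≤-sorted) list, structurally; p = previously seen value
def sdedupAux (p : Int) : List Int → List Int
  | [] => []
  | v :: vs => if v = p then sdedupAux p vs else v :: sdedupAux v vs

-- structural form of A's index loop: m = dict built so far, p = previous element
def afold (t : Int) (m : PySem.Dict Int Int) (p : Int) : List Int → PySem.Dict Int Int
  | [] => m
  | v :: vs =>
      afold t (if v - m.getD p 0 < t then m.insert v (m.getD p 0) else m.insert v v) v vs

-- (value, representative) pairs over the distinct sorted tail; r = current representative
def repAux (t r : Int) : List Int → List (Int × Int)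
  | [] => []
  | v :: vs => if v - r < t then (v, r) :: repAux t r vs else (v, v) :: repAux t v vs

-- representatives of the newly opened clusters
def repsAux (t r : Int) : List Int → List Int
  | [] => []
  | v :: vs => if v - r < t then repsAux t r vs else v :: repsAux t v vs

-- (value, cluster index) pairs; k = current cluster index
def idxAux (t r k : Int) : List Int → List (Int × Int)
  | [] => []
  | v :: vs => if v - r < t then (v, k) :: idxAux t r k vs else (v, k + 1) :: idxAux t v (k + 1) vs

-- named pieces of the two ports (definitionally equal to the corresponding let-bodies)
def gPair (a b : Int) (line : List Int) : List Int :=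
  [PySem.List.pyGetD line a 0, PySem.List.pyGetD line b 0]

def aEM (t : Int) (s : List Int) : PySem.Dict Int Int :=
  (PySem.List.pyRange 0 (s.length : Int) 1).foldl
    (fun m i =>
      if i = 0 then
        m.insert (PySem.List.pyGetD s i 0) (PySem.List.pyGetD s i 0)
      else if PySem.List.pyGetD s i 0 - m.getD (PySem.List.pyGetD s (i - 1) 0) 0 < t then
        m.insert (PySem.List.pyGetD s i 0) (m.getD (PySem.List.pyGetD s (i - 1) 0) 0)
      else
        m.insert (PySem.List.pyGetD s i 0) (PySem.List.pyGetD s i 0))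
    PySem.Dict.empty

def aEMI (em : PySem.Dict Int Int) : PySem.Dict Int Int :=
  (PySem.List.enumerate
      (PySem.List.sorted
        (PySem.Set.ofList
          ((em.keys.map (fun k => [k, em.getD k 0])).map (fun line => PySem.List.pyGetD line 1 0)))
        (fun x => x) false) 0).foldl
    (fun d p => d.insert p.2 p.1) PySem.Dict.empty

def aIND (emi : PySem.Dict Int Int) : PySem.Dict Int Int :=
  emi.items.foldl (fun d p => d.insert p.2 p.1) PySem.Dict.empty

def bV2I (t : Int) (vals : List Int) : PySem.Dict Int Int :=
  (PySem.List.enumerate (blocksLoop vals t vals.length 0) 0).foldl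
    (fun d p => p.2.foldl (fun d v => d.insert v p.1) d) PySem.Dict.empty

def bI2E (t : Int) (vals : List Int) : PySem.Dict Int Int :=
  (PySem.List.enumerate (blocksLoop vals t vals.length 0) 0).foldl
    (fun d p => d.insert p.1 (PySem.List.pyGetD p.2 0 0)) PySem.Dict.empty

lemma sdedup_pairwise : ∀ {vs : List Int} {p : Int},
    (p :: vs).Pairwise (· ≤ ·) → (p :: sdedupAux p vs).Pairwise (· < ·) := by
  intro vs
  induction vs with
  | nil => intro p _; simp [sdedupAux]
  | cons v vs ih =>
      intro p h
      rcases List.pairwise_cons.mp h with ⟨hp, hvs⟩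
      by_cases hv : v = p
      · have h' : (p :: vs).Pairwise (· ≤ ·) :=
          List.pairwise_cons.mpr ⟨fun x hx => hp x (List.mem_cons_of_mem _ hx),
            (List.pairwise_cons.mp hvs).2⟩
        simpa [sdedupAux, if_pos hv] using ih h'
      · have hpv : p < v := lt_of_le_of_ne (hp v (List.mem_cons_self)) (fun h' => hv h'.symm)
        have htail := ih (p := v) hvs
        simp only [sdedupAux, if_neg hv]
        refine List.pairwise_cons.mpr ⟨?_, htail⟩
        intro x hx
        rcases List.mem_cons.mp hx with rfl | hx2
        · exact hpv
        · exact lt_trans hpv (List.rel_of_pairwise_cons htail hx2)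

lemma mem_sdedup_iff : ∀ {vs : List Int} {p x : Int},
    (p :: vs).Pairwise (· ≤ ·) → (x ∈ p :: sdedupAux p vs ↔ x ∈ p :: vs) := by
  intro vs
  induction vs with
  | nil => intro p x _; simp [sdedupAux]
  | cons v vs ih =>
      intro p x h
      rcases List.pairwise_cons.mp h with ⟨hp, hvs⟩
      by_cases hv : v = p
      · have h' : (p :: vs).Pairwise (· ≤ ·) :=
          List.pairwise_cons.mpr ⟨fun y hy => hp y (List.mem_cons_of_mem _ hy),
            (List.pairwise_cons.mp hvs).2⟩
        have := ih (p := p) (x := x) h'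
        subst hv
        simp only [sdedupAux]
        simp only [List.mem_cons] at this ⊢
        tauto
      · have := ih (p := v) (x := x) hvs
        simp only [sdedupAux, if_neg hv]
        simp only [List.mem_cons] at this ⊢
        tauto

lemma insert_noop (d : PySem.Dict Int Int) (k v : Int)
    (hn : d.keys.Nodup) (hg : d.get? k = some v) : d.insert k v = d := by
  apply PySem.Dict.ext
  have hc : d.contains k = true := by
    rw [PySem.Dict.contains_eq_isSome_get?, hg]; rfl
  rw [PySem.Dict.items_insert_of_contains d v hc]
  have hcongr : ∀ p ∈ d.items, (if (p.1 == k) = true then (k, v) else p) = p := by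
    intro p hpmem
    by_cases hpk : p.1 = k
    · have hget : d.get? p.1 = some p.2 := PySem.Dict.get?_of_mem_items d hpmem hn
      rw [hpk] at hget
      have hv2 : p.2 = v := Option.some.inj (hget.symm.trans hg)
      rw [if_pos (by simp [hpk])]
      rw [← hpk, ← hv2]
    · simp [hpk]
  rw [List.map_congr_left hcongr]
  simp

lemma afold_items (t : Int) : ∀ (vs : List Int) (m : PySem.Dict Int Int) (p r : Int),
    (p :: vs).Pairwise (· ≤ ·) → m.keys.Nodup → (∀ y ∈ m.keys, y ≤ p) →
    m.get? p = some r → (r = p ∨ p - r < t) →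
    (afold t m p vs).items = m.items ++ repAux t r (sdedupAux p vs) := by
  intro vs
  induction vs with
  | nil => intro m p r _ _ _ _ _; simp [afold, sdedupAux, repAux]
  | cons v vs ih =>
      intro m p r hpw hnd hle hget hinv
      rcases List.pairwise_cons.mp hpw with ⟨hp, hvs⟩
      have hgd : m.getD p 0 = r := PySem.Dict.getD_of_get?_eq_some m 0 hget
      by_cases hv : v = p
      · subst hv
        have hm : (if v - m.getD v 0 < t then m.insert v (m.getD v 0) else m.insert v v) = m := by
          rw [hgd]
          by_cases hc : v - r < t
          · rw [if_pos hc]; exact insert_noop m v r hnd hget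
          · rw [if_neg hc]
            rcases hinv with h1 | h2
            · exact h1 ▸ insert_noop m v r hnd hget
            · exact absurd h2 hc
        have h' : (v :: vs).Pairwise (· ≤ ·) :=
          List.pairwise_cons.mpr ⟨fun y hy => hp y (List.mem_cons_of_mem _ hy),
            (List.pairwise_cons.mp hvs).2⟩
        simp only [afold, hm]
        rw [ih m v r h' hnd hle hget hinv]
        simp [sdedupAux]
      · have hpv : p < v := lt_of_le_of_ne (hp v (List.mem_cons_self)) (fun h' => hv h'.symm)
        have hvnotin : v ∉ m.keys := fun hmem => absurd (hle v hmem) (not_le.mpr hpv)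
        have hcont : m.contains v = false := by
          cases hcc : m.contains v with
          | false => rfl
          | true => exact absurd ((PySem.Dict.contains_iff_mem_keys m v).mp hcc) hvnotin
        simp only [afold, hgd]
        have hkeys' : ∀ w : Int, (m.insert v w).keys = m.keys ++ [v] :=
          fun w => PySem.Dict.keys_insert_of_not_contains m w hcont
        have hnd' : ∀ w : Int, (m.insert v w).keys.Nodup :=
          fun w => PySem.Dict.nodup_keys_insert m v w hnd
        have hle' : ∀ w : Int, ∀ y ∈ (m.insert v w).keys, y ≤ v := by
          intro w y hy
          rw [hkeys' w] at hy
          rcases List.mem_append.mp hy with h1 | h2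
          · exact le_trans (hle y h1) (le_of_lt hpv)
          · rw [List.mem_singleton.mp h2]
        have hitems' : ∀ w : Int, (m.insert v w).items = m.items ++ [(v, w)] :=
          fun w => PySem.Dict.items_insert_of_not_contains m w hcont
        by_cases hc : v - r < t
        · rw [if_pos hc]
          rw [ih (m.insert v r) v r hvs (hnd' r) (hle' r)
            (PySem.Dict.get?_insert_self m v r) (Or.inr hc)]
          rw [hitems' r]
          simp only [sdedupAux, if_neg hv, repAux, if_pos hc, List.append_assoc,
            List.singleton_append]
        · rw [if_neg hc]
          rw [ih (m.insert v v) v v hvs (hnd' v) (hle' v)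
            (PySem.Dict.get?_insert_self m v v) (Or.inl rfl)]
          rw [hitems' v]
          simp only [sdedupAux, if_neg hv, repAux, if_neg hc, List.append_assoc,
            List.singleton_append]

lemma pyfold_eq_afold (t : Int) (s : List Int) :
    ∀ (vs : List Int) (k : Nat) (m : PySem.Dict Int Int) (p : Int),
      s.length = k + vs.length → 1 ≤ k → s.drop k = vs → s[k - 1]? = some p →
      (PySem.List.pyRange (k : Int) (s.length : Int) 1).foldl
        (fun m i =>
          if i = 0 then
            m.insert (PySem.List.pyGetD s i 0) (PySem.List.pyGetD s i 0)
          else if PySem.List.pyGetD s i 0 - m.getD (PySem.List.pyGetD s (i - 1) 0) 0 < t then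
            m.insert (PySem.List.pyGetD s i 0) (m.getD (PySem.List.pyGetD s (i - 1) 0) 0)
          else
            m.insert (PySem.List.pyGetD s i 0) (PySem.List.pyGetD s i 0)) m
      = afold t m p vs := by
  intro vs
  induction vs with
  | nil =>
      intro k m p hlen _ _ _
      have hba : (s.length : Int) ≤ (k : Int) := by
        have : s.length = k := by simpa using hlen
        omega
      rw [PySem.List.pyRange_one_eq_nil hba]
      simp [afold]
  | cons v vs ih =>
      intro k m p hlen h1 hdrop hget
      have hkl : k < s.length := by simp at hlen; omega
      have hk : (k : Int) < (s.length : Int) := by exact_mod_cast hkl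
      rw [PySem.List.pyRange_one_cons hk, List.foldl_cons]
      have hk0 : ¬ ((k : Int) = 0) := by
        intro h; have : k = 0 := by exact_mod_cast h
        omega
      have hskv : s[k]? = some v := by
        have h0 : (List.drop k s)[0]? = some v := by rw [hdrop]; rfl
        rw [List.getElem?_drop] at h0
        simpa using h0
      have hsv : PySem.List.pyGetD s (k : Int) 0 = v := by
        rw [PySem.List.pyGetD_natCast]
        rw [List.getD_eq_getElem?_getD, hskv]; rfl
      have hsp : PySem.List.pyGetD s ((k : Int) - 1) 0 = p := by
        have hcast : (k : Int) - 1 = ((k - 1 : Nat) : Int) := by omega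
        rw [hcast, PySem.List.pyGetD_natCast]
        rw [List.getD_eq_getElem?_getD, hget]; rfl
      rw [if_neg hk0, hsv, hsp]
      simp only [afold]
      have hcast1 : (k : Int) + 1 = ((k + 1 : Nat) : Int) := by push_cast; ring
      rw [hcast1]
      apply ih (k + 1)
      · simp at hlen ⊢; omega
      · omega
      · have h2 := congrArg (List.drop 1) hdrop
        simp only [List.drop_drop] at h2
        simpa [Nat.add_comm] using h2
      · have : k + 1 - 1 = k := by omega
        rw [this]; exact hskv

lemma pyfold_top (t : Int) (p : Int) (vs : List Int) :
    aEM t (p :: vs) = afold t (PySem.Dict.empty.insert p p) p vs := by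
  unfold aEM
  have h0 : (0 : Int) < ((p :: vs).length : Int) := by
    exact_mod_cast Nat.succ_pos vs.length
  rw [PySem.List.pyRange_one_cons h0, List.foldl_cons, if_pos rfl]
  have hg0 : PySem.List.pyGetD (p :: vs) (0 : Int) 0 = p := by
    rw [PySem.List.pyGetD_ofNat']; rfl
  rw [hg0]
  have hcast : (0 : Int) + 1 = ((1 : Nat) : Int) := by norm_num
  rw [hcast]
  refine pyfold_eq_afold t (p :: vs) vs 1 _ p ?_ ?_ ?_ ?_
  · simp [Nat.add_comm]
  · omega
  · rfl
  · rfl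

lemma repAux_fst (t : Int) : ∀ (vs : List Int) (r : Int), (repAux t r vs).map (·.1) = vs := by
  intro vs
  induction vs with
  | nil => intro r; simp [repAux]
  | cons v vs ih =>
      intro r
      by_cases hc : v - r < t
      · simp [repAux, if_pos hc, ih]
      · simp [repAux, if_neg hc, ih]

lemma idxAux_fst (t : Int) : ∀ (vs : List Int) (r k : Int), (idxAux t r k vs).map (·.1) = vs := by
  intro vs
  induction vs with
  | nil => intro r k; simp [idxAux]
  | cons v vs ih =>
      intro r k
      by_cases hc : v - r < t
      · simp [idxAux, if_pos hc, ih]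
      · simp [idxAux, if_neg hc, ih]

lemma reps_pairwise (t : Int) : ∀ {vs : List Int} {r : Int},
    (r :: vs).Pairwise (· < ·) → (r :: repsAux t r vs).Pairwise (· < ·) := by
  intro vs
  induction vs with
  | nil => intro r _; simp [repsAux]
  | cons v vs ih =>
      intro r h
      rcases List.pairwise_cons.mp h with ⟨hr, hvs⟩
      have hrv : r < v := hr v (List.mem_cons_self)
      by_cases hc : v - r < t
      · have h' : (r :: vs).Pairwise (· < ·) :=
          List.pairwise_cons.mpr ⟨fun y hy => hr y (List.mem_cons_of_mem _ hy),
            (List.pairwise_cons.mp hvs).2⟩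
        simpa [repsAux, if_pos hc] using ih h'
      · have htail := ih (r := v) hvs
        simp only [repsAux, if_neg hc]
        refine List.pairwise_cons.mpr ⟨?_, htail⟩
        intro x hx
        rcases List.mem_cons.mp hx with rfl | hx2
        · exact hrv
        · exact lt_trans hrv (List.rel_of_pairwise_cons htail hx2)

lemma foldl_add_values (t : Int) : ∀ (vs : List Int) (r : Int) (s : List Int),
    (r :: vs).Pairwise (· < ·) → s.Nodup → r ∈ s → (∀ y ∈ s, y ≤ r) →
    ((repAux t r vs).map (·.2)).foldl PySem.Set.add s = s ++ repsAux t r vs := by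
  intro vs
  induction vs with
  | nil => intro r s _ _ _ _; simp [repAux, repsAux]
  | cons v vs ih =>
      intro r s hpw hnd hmem hle
      rcases List.pairwise_cons.mp hpw with ⟨hr, hvs⟩
      have hrv : r < v := hr v (List.mem_cons_self)
      by_cases hc : v - r < t
      · have h' : (r :: vs).Pairwise (· < ·) :=
          List.pairwise_cons.mpr ⟨fun y hy => hr y (List.mem_cons_of_mem _ hy),
            (List.pairwise_cons.mp hvs).2⟩
        simp only [repAux, if_pos hc, repsAux, List.map_cons, List.foldl_cons]
        rw [PySem.Set.add_of_mem hmem]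
        exact ih r s h' hnd hmem hle
      · have hvnot : v ∉ s := fun hv => absurd (hle v hv) (not_le.mpr hrv)
        simp only [repAux, if_neg hc, repsAux, List.map_cons, List.foldl_cons]
        rw [PySem.Set.add_of_not_mem hvnot]
        have hnd' : (s ++ [v]).Nodup :=
          hnd.append (List.nodup_singleton v) (by simp [List.disjoint_singleton, hvnot])
        have hle' : ∀ y ∈ s ++ [v], y ≤ v := by
          intro y hy
          rcases List.mem_append.mp hy with h1 | h2
          · exact le_trans (hle y h1) (le_of_lt hrv)
          · rw [List.mem_singleton.mp h2]
        rw [ih v (s ++ [v]) hvs hnd' (by simp) hle']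
        simp

lemma rep_idx_pair (t : Int) : ∀ (vs : List Int) (r k v : Int), v ∈ vs →
    (r :: vs).Pairwise (· < ·) →
    ∃ rv kv, (v, rv) ∈ repAux t r vs ∧ (v, kv) ∈ idxAux t r k vs ∧
      (kv, rv) ∈ (k, r) :: PySem.List.enumerate (repsAux t r vs) (k + 1) := by
  intro vs
  induction vs with
  | nil => intro r k v hv; exact absurd hv (List.not_mem_nil)
  | cons w vs ih =>
      intro r k v hv hpw
      rcases List.pairwise_cons.mp hpw with ⟨hr, hvs⟩
      by_cases hc : w - r < t
      · have h' : (r :: vs).Pairwise (· < ·) :=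
          List.pairwise_cons.mpr ⟨fun y hy => hr y (List.mem_cons_of_mem _ hy),
            (List.pairwise_cons.mp hvs).2⟩
        rcases List.mem_cons.mp hv with rfl | hv2
        · exact ⟨r, k, by simp [repAux, if_pos hc], by simp [idxAux, if_pos hc],
            by simp [repsAux, if_pos hc]⟩
        · rcases ih r k v hv2 h' with ⟨rv, kv, h1, h2, h3⟩
          refine ⟨rv, kv, ?_, ?_, ?_⟩
          · simp only [repAux, if_pos hc]; exact List.mem_cons_of_mem _ h1
          · simp only [idxAux, if_pos hc]; exact List.mem_cons_of_mem _ h2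
          · simpa [repsAux, if_pos hc] using h3
      · rcases List.mem_cons.mp hv with rfl | hv2
        · refine ⟨v, k + 1, by simp [repAux, if_neg hc], by simp [idxAux, if_neg hc], ?_⟩
          simp [repsAux, if_neg hc, PySem.List.enumerate_cons]
        · rcases ih w (k + 1) v hv2 hvs with ⟨rv, kv, h1, h2, h3⟩
          refine ⟨rv, kv, ?_, ?_, ?_⟩
          · simp only [repAux, if_neg hc]; exact List.mem_cons_of_mem _ h1
          · simp only [idxAux, if_neg hc]; exact List.mem_cons_of_mem _ h2
          · simp only [repsAux, if_neg hc, PySem.List.enumerate_cons]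
            rcases List.mem_cons.mp h3 with h4 | h5
            · exact List.mem_cons_of_mem _ (List.mem_cons.mpr (Or.inl h4))
            · exact List.mem_cons_of_mem _ (List.mem_cons_of_mem _ h5)

lemma lookup_eq (t p : Int) (dt : List Int) (hdpw : (p :: dt).Pairwise (· < ·))
    (em emi v2i : PySem.Dict Int Int)
    (hem : em.items = (p, p) :: repAux t p dt)
    (hemi : emi.items = (PySem.List.enumerate (p :: repsAux t p dt) 0).map (fun q => (q.2, q.1)))
    (hv2i : v2i.items = (p, 0) :: idxAux t p 0 dt) :
    ∀ v ∈ p :: dt, emi.getD (em.getD v 0) 0 = v2i.getD v 0 := by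
  have hemnd : em.keys.Nodup := by
    simp only [PySem.Dict.keys, hem]
    simp only [List.map_cons, repAux_fst]
    exact hdpw.imp fun h => ne_of_lt h
  have hemind : emi.keys.Nodup := by
    simp only [PySem.Dict.keys, hemi, List.map_map]
    have : ((fun p => p.1) ∘ fun q : Int × Int => (q.2, q.1)) = (fun q : Int × Int => q.2) := rfl
    rw [this, PySem.List.map_snd_enumerate]
    exact (reps_pairwise t hdpw).imp fun h => ne_of_lt h
  have hv2ind : v2i.keys.Nodup := by
    simp only [PySem.Dict.keys, hv2i]
    simp only [List.map_cons, idxAux_fst]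
    exact hdpw.imp fun h => ne_of_lt h
  intro v hv
  rcases List.mem_cons.mp hv with rfl | hvdt
  · have h1 : em.getD v 0 = v :=
      PySem.Dict.getD_of_mem_items em (by rw [hem]; exact List.mem_cons_self) hemnd 0
    have h2 : emi.getD v 0 = 0 := by
      apply PySem.Dict.getD_of_mem_items emi ?_ hemind 0
      rw [hemi, PySem.List.enumerate_cons]
      simp
    have h3 : v2i.getD v 0 = 0 :=
      PySem.Dict.getD_of_mem_items v2i (by rw [hv2i]; exact List.mem_cons_self) hv2ind 0
    rw [h1, h2, h3]
  · rcases rep_idx_pair t dt p 0 v hvdt hdpw with ⟨rv, kv, hr1, hr2, hr3⟩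
    have h1 : em.getD v 0 = rv :=
      PySem.Dict.getD_of_mem_items em (by rw [hem]; exact List.mem_cons_of_mem _ hr1) hemnd 0
    have h3 : v2i.getD v 0 = kv :=
      PySem.Dict.getD_of_mem_items v2i (by rw [hv2i]; exact List.mem_cons_of_mem _ hr2) hv2ind 0
    have h2 : emi.getD rv 0 = kv := by
      apply PySem.Dict.getD_of_mem_items emi ?_ hemind 0
      rw [hemi]
      have hmem : (kv, rv) ∈ PySem.List.enumerate (p :: repsAux t p dt) 0 := by
        rw [PySem.List.enumerate_cons]; exact hr3
      exact List.mem_map.mpr ⟨(kv, rv), hmem, rfl⟩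
    rw [h1, h2, h3]

def blocksRec (t : Int) : List Int → List (List Int)
  | [] => []
  | v :: vs =>
      (v :: vs.takeWhile (fun w => decide (w < v + t))) ::
        blocksRec t (vs.dropWhile (fun w => decide (w < v + t)))
termination_by l => l.length
decreasing_by
  have := List.length_dropWhile_le (fun w => decide (w < v + t)) vs
  simp at *; omega

lemma bisectLeft_succ (a : List Int) (x : Int) (fuel lo hi : Nat) :
    bisectLeft a x (fuel + 1) lo hi =
      (if lo < hi then
        (if PySem.List.pyGetD a (((lo + hi) / 2 : Nat) : Int) 0 < x then
          bisectLeft a x fuel ((lo + hi) / 2 + 1) hi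
        else bisectLeft a x fuel lo ((lo + hi) / 2))
      else lo) := rfl

lemma blocksLoop_succ (vals : List Int) (t : Int) (fuel lo : Nat) :
    blocksLoop vals t (fuel + 1) lo =
      (if lo < vals.length then
        PySem.List.slice vals (some (lo : Int))
            (some ((bisectLeft vals (PySem.List.pyGetD vals (lo : Int) 0 + t) vals.length (lo + 1) vals.length : Nat) : Int))
          :: blocksLoop vals t fuel
              (bisectLeft vals (PySem.List.pyGetD vals (lo : Int) 0 + t) vals.length (lo + 1) vals.length)
      else []) := rfl

lemma blocksLoop_nil (t : Int) (fuel lo : Nat) : blocksLoop [] t fuel lo = [] := by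
  cases fuel with
  | zero => rfl
  | succ fuel => rw [blocksLoop_succ]; simp

lemma getD_lt {L : List Int} {i : Nat} (h : i < L.length) : L.getD i 0 = L[i] := by
  rw [List.getD_eq_getElem?_getD, List.getElem?_eq_getElem h]; rfl

lemma sorted_getD_mono {a : List Int} (hs : a.Pairwise (· ≤ ·)) {i j : Nat}
    (hij : i ≤ j) (hj : j < a.length) : a.getD i 0 ≤ a.getD j 0 := by
  rcases Nat.eq_or_lt_of_le hij with rfl | h
  · exact le_refl _
  · rw [getD_lt (lt_of_le_of_lt hij hj), getD_lt hj]
    exact List.pairwise_iff_getElem.mp hs i j _ _ h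

lemma bisectLeft_char (a : List Int) (x : Int) (hs : a.Pairwise (· ≤ ·)) :
    ∀ (fuel lo hi : Nat), hi - lo ≤ fuel → lo ≤ hi → hi ≤ a.length →
      lo ≤ bisectLeft a x fuel lo hi ∧ bisectLeft a x fuel lo hi ≤ hi ∧
      (∀ i : Nat, lo ≤ i → i < bisectLeft a x fuel lo hi → a.getD i 0 < x) ∧
      (∀ i : Nat, bisectLeft a x fuel lo hi ≤ i → i < hi → ¬ a.getD i 0 < x) := by
  intro fuel
  induction fuel with
  | zero =>
      intro lo hi hf hlh hha
      have h0 : bisectLeft a x 0 lo hi = lo := rfl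
      rw [h0]
      exact ⟨le_refl _, by omega, fun i h1 h2 => by omega, fun i h1 h2 => by omega⟩
  | succ fuel ih =>
      intro lo hi hf hlh hha
      rw [bisectLeft_succ]
      by_cases h : lo < hi
      · rw [if_pos h]
        set mid := (lo + hi) / 2 with hmid
        have hmlo : lo ≤ mid := by omega
        have hmhi : mid < hi := by omega
        have hg : PySem.List.pyGetD a (mid : Int) 0 = a.getD mid 0 := by
          simp [PySem.List.pyGetD_natCast]
        by_cases hc : PySem.List.pyGetD a (mid : Int) 0 < x
        · rw [if_pos hc]
          rw [hg] at hc
          obtain ⟨i1, i2, i3, i4⟩ := ih (mid + 1) hi (by omega) (by omega) hha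
          refine ⟨by omega, i2, ?_, i4⟩
          intro i hloi hir
          by_cases hile : i ≤ mid
          · exact lt_of_le_of_lt (sorted_getD_mono hs hile (by omega)) hc
          · exact i3 i (by omega) hir
        · rw [if_neg hc]
          rw [hg] at hc
          obtain ⟨i1, i2, i3, i4⟩ := ih lo mid (by omega) (by omega) (by omega)
          refine ⟨i1, by omega, i3, ?_⟩
          intro i hri hihi
          by_cases him : mid ≤ i
          · exact not_lt.mpr (le_trans (not_lt.mp hc) (sorted_getD_mono hs him (by omega)))
          · exact i4 i hri (by omega)
      · rw [if_neg h]
        exact ⟨le_refl _, by omega, fun i h1 h2 => by omega, fun i h1 h2 => by omega⟩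

lemma takeWhile_eq_take_of (p : Int → Bool) :
    ∀ (L : List Int) (k : Nat), k ≤ L.length →
      (∀ i : Nat, i < k → p (L.getD i 0) = true) →
      (∀ i : Nat, k ≤ i → i < L.length → p (L.getD i 0) = false) →
      L.takeWhile p = L.take k ∧ L.dropWhile p = L.drop k := by
  intro L
  induction L with
  | nil => intro k hk _ _; simp at hk; simp [hk]
  | cons v L ih =>
      intro k hk h1 h2
      cases k with
      | zero =>
          have hv : p v = false := h2 0 (by omega) (by simp)
          simp [hv]
      | succ k' =>
          have hv : p v = true := h1 0 (by omega)
          have := ih k' (by simpa using hk)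
            (fun i hi => h1 (i + 1) (by omega))
            (fun i hki hil => h2 (i + 1) (by omega) (by simp; omega))
          simp [hv, this.1, this.2]

lemma blocksLoop_eq_rec (vals : List Int) (t : Int) (hs : vals.Pairwise (· ≤ ·)) :
    ∀ (fuel lo : Nat), vals.length - lo ≤ fuel → blocksLoop vals t fuel lo = blocksRec t (vals.drop lo) := by
  intro fuel
  induction fuel with
  | zero =>
      intro lo hlo
      rw [List.drop_eq_nil_of_le (by omega)]
      simp [blocksLoop, blocksRec]
  | succ fuel ih =>
      intro lo hlo
      by_cases hlt : lo < vals.length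
      · have hv : PySem.List.pyGetD vals (lo : Int) 0 = vals.getD lo 0 := by
          simp [PySem.List.pyGetD_natCast]
        rw [blocksLoop_succ, if_pos hlt, hv]
        obtain ⟨c1, c2, c3, c4⟩ := bisectLeft_char vals (vals.getD lo 0 + t) hs vals.length
          (lo + 1) vals.length (by omega) (by omega) (le_refl _)
        set hi := bisectLeft vals (vals.getD lo 0 + t) vals.length (lo + 1) vals.length with hhi
        set L := vals.drop (lo + 1) with hL
        have hLlen : L.length = vals.length - (lo + 1) := by simp [hL]
        have hLget : ∀ i : Nat, L.getD i 0 = vals.getD (lo + 1 + i) 0 := by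
          intro i
          rw [List.getD_eq_getElem?_getD, List.getD_eq_getElem?_getD, hL, List.getElem?_drop]
        set k := hi - (lo + 1) with hk
        have htw : L.takeWhile (fun w => decide (w < vals.getD lo 0 + t)) = L.take k ∧
            L.dropWhile (fun w => decide (w < vals.getD lo 0 + t)) = L.drop k := by
          apply takeWhile_eq_take_of _ L k (by omega)
          · intro i hik
            rw [hLget]
            simp only [decide_eq_true_eq]
            exact c3 (lo + 1 + i) (by omega) (by omega)
          · intro i hki hil
            rw [hLget]
            simp only [decide_eq_false_iff_not]
            exact c4 (lo + 1 + i) (by omega) (by omega)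
        have hdrop : vals.drop lo = vals.getD lo 0 :: L := by
          rw [List.drop_eq_getElem_cons hlt, getD_lt hlt, hL]
        rw [hdrop]
        rw [blocksRec, htw.1, htw.2]
        have hslice : PySem.List.slice vals (some (lo : Int)) (some (hi : Int))
            = vals.getD lo 0 :: L.take k := by
          rw [PySem.List.slice_natCast, hdrop]
          have hko : hi - lo = k + 1 := by omega
          rw [hko, List.take_succ_cons]
        have hdrophi : vals.drop hi = L.drop k := by
          rw [hL, List.drop_drop]
          congr 1
          omega
        rw [hslice, ih hi (by omega), hdrophi]
      · rw [List.drop_eq_nil_of_le (by omega)]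
        rw [blocksLoop_succ, if_neg (by omega)]
        simp [blocksRec]

lemma repsAux_split_nil (t : Int) : ∀ (vs : List Int) (r : Int),
    vs.dropWhile (fun w => decide (w < r + t)) = [] → repsAux t r vs = [] := by
  intro vs
  induction vs with
  | nil => intro r _; simp [repsAux]
  | cons v vs ih =>
      intro r hdw
      rw [List.dropWhile_cons] at hdw
      by_cases hc : v - r < t
      · have hb : (decide (v < r + t)) = true := by simp; omega
        rw [hb, if_pos rfl] at hdw
        simp only [repsAux, if_pos hc]
        exact ih r hdw
      · have hb : (decide (v < r + t)) = false := by simp; omega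
        rw [hb] at hdw
        simp at hdw

lemma repsAux_split_cons (t : Int) : ∀ (vs : List Int) (r w : Int) (ws : List Int),
    vs.dropWhile (fun w => decide (w < r + t)) = w :: ws →
    repsAux t r vs = w :: repsAux t w ws := by
  intro vs
  induction vs with
  | nil => intro r w ws h; simp at h
  | cons v vs ih =>
      intro r w ws hdw
      rw [List.dropWhile_cons] at hdw
      by_cases hc : v - r < t
      · have hb : (decide (v < r + t)) = true := by simp; omega
        rw [hb, if_pos rfl] at hdw
        simp only [repsAux, if_pos hc]
        exact ih r w ws hdw
      · have hb : (decide (v < r + t)) = false := by simp; omega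
        rw [hb] at hdw
        simp at hdw
        obtain ⟨h1, h2⟩ := hdw
        subst h1; subst h2
        simp [repsAux, if_neg hc]

lemma idxAux_split (t : Int) : ∀ (vs : List Int) (r k : Int),
    idxAux t r k vs = (vs.takeWhile (fun w => decide (w < r + t))).map (fun v => (v, k)) ++
      (match vs.dropWhile (fun w => decide (w < r + t)) with
        | [] => []
        | w :: ws => (w, k + 1) :: idxAux t w (k + 1) ws) := by
  intro vs
  induction vs with
  | nil => intro r k; simp [idxAux]
  | cons v vs ih =>
      intro r k
      rw [List.takeWhile_cons, List.dropWhile_cons]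
      by_cases hc : v - r < t
      · have hb : (decide (v < r + t)) = true := by simp; omega
        rw [hb, if_pos rfl, if_pos rfl]
        simp only [idxAux, if_pos hc, List.map_cons, List.cons_append]
        rw [ih r k]
      · have hb : (decide (v < r + t)) = false := by simp; omega
        rw [hb]
        simp only [Bool.false_eq_true, idxAux, if_neg hc]
        simp


def flatBlocks (E : List (Int × List Int)) : List (Int × Int) :=
  E.flatMap (fun p => p.2.map (fun v => (v, p.1)))

lemma flatBlocks_nil : flatBlocks [] = [] := rfl

lemma flatBlocks_cons (e : Int × List Int) (E : List (Int × List Int)) :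
    flatBlocks (e :: E) = e.2.map (fun v => (v, e.1)) ++ flatBlocks E := rfl

lemma blocksRec_heads (t : Int) : ∀ (n : Nat) (r : Int) (vs : List Int), vs.length ≤ n →
    (blocksRec t (r :: vs)).map (fun b => PySem.List.pyGetD b 0 0) = r :: repsAux t r vs := by
  intro n
  induction n with
  | zero =>
      intro r vs hlen
      have hvs : vs = [] := List.eq_nil_of_length_eq_zero (by omega)
      subst hvs
      simp [blocksRec, repsAux, PySem.List.pyGetD_ofNat']
  | succ n ih =>
      intro r vs hlen
      rw [blocksRec]
      cases hdw : vs.dropWhile (fun w => decide (w < r + t)) with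
      | nil =>
          rw [repsAux_split_nil t vs r hdw]
          simp [blocksRec, PySem.List.pyGetD_ofNat']
      | cons w ws =>
          have hwlen : ws.length ≤ n := by
            have := List.length_dropWhile_le (fun w => decide (w < r + t)) vs
            rw [hdw] at this
            simp at this
            omega
          rw [repsAux_split_cons t vs r w ws hdw]
          simp only [List.map_cons, ih w ws hwlen]
          simp [PySem.List.pyGetD_ofNat']

lemma blocksRec_pairs (t : Int) : ∀ (n : Nat) (r k : Int) (vs : List Int), vs.length ≤ n →
    flatBlocks (PySem.List.enumerate (blocksRec t (r :: vs)) k) = (r, k) :: idxAux t r k vs := by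
  intro n
  induction n with
  | zero =>
      intro r k vs hlen
      have hvs : vs = [] := List.eq_nil_of_length_eq_zero (by omega)
      subst hvs
      simp [blocksRec, idxAux, PySem.List.enumerate_cons, PySem.List.enumerate_nil,
        flatBlocks_cons, flatBlocks_nil]
  | succ n ih =>
      intro r k vs hlen
      rw [blocksRec, idxAux_split, PySem.List.enumerate_cons]
      cases hdw : vs.dropWhile (fun w => decide (w < r + t)) with
      | nil =>
          simp [blocksRec, PySem.List.enumerate_nil, flatBlocks_cons, flatBlocks_nil]
      | cons w ws =>
          have hwlen : ws.length ≤ n := by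
            have := List.length_dropWhile_le (fun w => decide (w < r + t)) vs
            rw [hdw] at this
            simp at this
            omega
          rw [flatBlocks_cons]
          rw [ih w (k + 1) ws hwlen]
          simp

lemma foldl_nested (E : List (Int × List Int)) (d : PySem.Dict Int Int) :
    E.foldl (fun d p => p.2.foldl (fun d v => d.insert v p.1) d) d
    = (flatBlocks E).foldl (fun d q => d.insert q.1 q.2) d := by
  induction E generalizing d with
  | nil => simp [flatBlocks_nil]
  | cons e E ih =>
      rw [List.foldl_cons, flatBlocks_cons, List.foldl_append, ih]
      congr 1
      rw [List.foldl_map]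

lemma enumerate_map_head : ∀ (Bs : List (List Int)) (k : Int),
    (PySem.List.enumerate Bs k).map (fun p => (p.1, PySem.List.pyGetD p.2 0 0))
    = PySem.List.enumerate (Bs.map (fun b => PySem.List.pyGetD b 0 0)) k := by
  intro Bs
  induction Bs with
  | nil => intro k; simp [PySem.List.enumerate_nil]
  | cons b Bs ih => intro k; simp [PySem.List.enumerate_cons, ih]

theorem master (lines : List (List Int)) (t a b : Int) :
    (lines.map (fun line => [(aEMI (aEM t (PySem.List.sorted ((lines.map (gPair a b)).foldl (fun acc e => acc ++ e) []) (fun x => x) false))).getD ((aEM t (PySem.List.sorted ((lines.map (gPair a b)).foldl (fun acc e => acc ++ e) []) (fun x => x) false)).getD (PySem.List.pyGetD line a 0) 0) 0, (aEMI (aEM t (PySem.List.sorted ((lines.map (gPair a b)).foldl (fun acc e => acc ++ e) []) (fun x => x) false))).getD ((aEM t (PySem.List.sorted ((lines.map (gPair a b)).foldl (fun acc e => acc ++ e) []) (fun x => x) false)).getD (PySem.List.pyGetD line b 0) 0) 0]), (aIND (aEMI (aEM t (PySem.List.sorted ((lines.map (gPair a b)).foldl (fun acc e => acc ++ e) [])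 (fun x => x) false)))).items)
    = (lines.map (fun line => [(bV2I t (PySem.List.sorted (PySem.Set.ofList (lines.flatMap (gPair a b))) (fun x => x) false)).getD (PySem.List.pyGetD line a 0) 0, (bV2I t (PySem.List.sorted (PySem.Set.ofList (lines.flatMap (gPair a b))) (fun x => x) false)).getD (PySem.List.pyGetD line b 0) 0]), (bI2E t (PySem.List.sorted (PySem.Set.ofList (lines.flatMap (gPair a b))) (fun x => x) false)).items) := by
  cases lines with
  | nil =>
      simp only [List.map_nil]
      refine congrArg₂ Prod.mk rfl ?_
      have hv : (PySem.List.sorted (PySem.Set.ofList (([] : List (List Int)).flatMap (gPair a b))) (fun x => x) false) = [] := rfl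
      rw [hv]
      unfold bI2E
      rw [blocksLoop_nil]
      rfl
  | cons l0 rest =>
    have hflat : (((l0 :: rest).map (gPair a b)).foldl (fun acc e => acc ++ e) [])
        = (l0 :: rest).flatMap (gPair a b) := by
      rw [PySem.List.foldl_append_eq_flatten, List.nil_append, ← List.flatMap_def]
    rw [hflat]
    have hxne : (l0 :: rest).flatMap (gPair a b) ≠ [] := by
      simp [gPair]
    obtain ⟨p, vs, hpvs⟩ := List.ne_nil_iff_exists_cons.mp
      (show PySem.List.sorted ((l0 :: rest).flatMap (gPair a b)) (fun x => x) false ≠ [] by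
        rw [Ne, PySem.List.sorted_eq_nil_iff]; exact hxne)
    rw [hpvs]
    have hpw_le : (p :: vs).Pairwise (· ≤ ·) := by
      have h := PySem.List.sorted_pairwise ((l0 :: rest).flatMap (gPair a b)) (fun x => x)
      rw [hpvs] at h
      exact h
    have hd : PySem.List.sorted (PySem.Set.ofList ((l0 :: rest).flatMap (gPair a b))) (fun x => x) false
        = p :: sdedupAux p vs := by
      apply PySem.List.sorted_eq_of_perm_of_pairwise_lt
      · rw [List.perm_ext_iff_of_nodup ((sdedup_pairwise hpw_le).imp fun h => ne_of_lt h)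
          (PySem.Set.nodup_ofList _)]
        intro x
        rw [mem_sdedup_iff hpw_le, ← hpvs, PySem.List.mem_sorted, PySem.Set.mem_ofList]
      · exact sdedup_pairwise hpw_le
    rw [hd]
    set dt := sdedupAux p vs with hdt
    have hdpw : (p :: dt).Pairwise (· < ·) := sdedup_pairwise hpw_le
    -- A side: the edges_map dict
    have hEM : (aEM t (p :: vs)).items = (p, p) :: repAux t p dt := by
      rw [pyfold_top]
      rw [afold_items t vs _ p p hpw_le
        (by rw [show (PySem.Dict.empty.insert p p : PySem.Dict Int Int).keys = [p] from rfl]; simp)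
        (by intro y hy
            rw [show (PySem.Dict.empty.insert p p : PySem.Dict Int Int).keys = [p] from rfl] at hy
            simp at hy; omega)
        (PySem.Dict.get?_insert_self _ p p) (Or.inl rfl)]
      rw [show (PySem.Dict.empty.insert p p : PySem.Dict Int Int).items = [(p, p)] from rfl]
      rfl
    have hEMnd : (aEM t (p :: vs)).keys.Nodup := by
      simp only [PySem.Dict.keys, hEM, List.map_cons, repAux_fst]
      exact hdpw.imp fun h => ne_of_lt h
    -- A side: the index dict
    have hEMI : (aEMI (aEM t (p :: vs))).items
        = (PySem.List.enumerate (p :: repsAux t p dt) 0).map (fun q => (q.2, q.1)) := by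
      unfold aEMI
      have hVal : (((aEM t (p :: vs)).keys.map (fun k => [k, (aEM t (p :: vs)).getD k 0])).map
          (fun line => PySem.List.pyGetD line 1 0))
          = p :: (repAux t p dt).map (·.2) := by
        rw [List.map_map]
        have h1 : ∀ k_ ∈ (aEM t (p :: vs)).keys,
            ((fun line => PySem.List.pyGetD line 1 0) ∘ fun k => [k, (aEM t (p :: vs)).getD k 0]) k_
            = (aEM t (p :: vs)).getD k_ 0 := by
          intro k_ _
          show PySem.List.pyGetD [k_, (aEM t (p :: vs)).getD k_ 0] (1 : Int) 0 = _
          rw [PySem.List.pyGetD_ofNat']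
          rfl
        rw [List.map_congr_left h1, ← PySem.Dict.values_eq_map_keys _ hEMnd 0]
        show (aEM t (p :: vs)).items.map (·.2) = _
        rw [hEM]
        simp
      rw [hVal]
      have hofl : PySem.Set.ofList (p :: (repAux t p dt).map (·.2)) = p :: repsAux t p dt := by
        rw [PySem.Set.ofList_eq_foldl, List.foldl_cons,
          PySem.Set.add_of_not_mem (List.not_mem_nil)]
        simpa using foldl_add_values t dt p [p] hdpw (by simp) (by simp) (by simp)
      rw [hofl]
      rw [PySem.List.sorted_eq_self_of_pairwise _ _ ((reps_pairwise t hdpw).imp fun h => le_of_lt h)]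
      rw [PySem.Dict.items_foldl_insert_fresh _ (fun q : Int × Int => q.2) (fun q : Int × Int => q.1) _
        (fun a_ _ => rfl)
        (by rw [PySem.List.map_snd_enumerate]
            exact (reps_pairwise t hdpw).imp fun h => ne_of_lt h)]
      simp [show (PySem.Dict.empty : PySem.Dict Int Int).items = [] from rfl]
    -- A side: ind2edges
    have hIND : (aIND (aEMI (aEM t (p :: vs)))).items
        = PySem.List.enumerate (p :: repsAux t p dt) 0 := by
      unfold aIND
      rw [hEMI]
      rw [PySem.Dict.items_foldl_insert_fresh _ (fun q : Int × Int => q.2) (fun q : Int × Int => q.1) _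
        (fun a_ _ => rfl)
        (by rw [List.map_map]
            have hco : ((fun q : Int × Int => q.2) ∘ fun q : Int × Int => (q.2, q.1))
                = (fun q : Int × Int => q.1) := rfl
            rw [hco, PySem.List.map_fst_enumerate]
            exact PySem.List.nodup_pyRange_one _ _)]
      simp only [List.map_map]
      rw [show ((fun a : Int × Int => (a.2, a.1)) ∘ fun a : Int × Int => (a.2, a.1)) = id from rfl]
      simp [show (PySem.Dict.empty : PySem.Dict Int Int).items = [] from rfl]
    -- B side: the maximal-block partition of the sorted distinct values
    have hple : (p :: dt).Pairwise (· ≤ ·) := hdpw.imp fun h => le_of_lt h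
    have hBlocks : blocksLoop (p :: dt) t (p :: dt).length 0 = blocksRec t (p :: dt) := by
      have := blocksLoop_eq_rec (p :: dt) t hple (p :: dt).length 0 (by omega)
      simpa using this
    have hPairs : flatBlocks (PySem.List.enumerate (blocksRec t (p :: dt)) 0)
        = (p, 0) :: idxAux t p 0 dt := blocksRec_pairs t dt.length p 0 dt le_rfl
    have hHeads : (blocksRec t (p :: dt)).map (fun b => PySem.List.pyGetD b 0 0)
        = p :: repsAux t p dt := blocksRec_heads t dt.length p dt le_rfl
    have hV2I : (bV2I t (p :: dt)).items = (p, 0) :: idxAux t p 0 dt := by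
      unfold bV2I
      rw [hBlocks, foldl_nested]
      rw [PySem.Dict.items_foldl_insert_fresh _ (fun q : Int × Int => q.1) (fun q : Int × Int => q.2) _
        (fun a_ _ => rfl)
        (by rw [hPairs]
            simp only [List.map_cons, idxAux_fst]
            exact hdpw.imp fun h => ne_of_lt h)]
      rw [hPairs]
      simp [show (PySem.Dict.empty : PySem.Dict Int Int).items = [] from rfl]
    have hI2E : (bI2E t (p :: dt)).items = PySem.List.enumerate (p :: repsAux t p dt) 0 := by
      unfold bI2E
      rw [hBlocks]
      rw [PySem.Dict.items_foldl_insert_fresh _ (fun q : Int × List Int => q.1)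
        (fun q : Int × List Int => PySem.List.pyGetD q.2 0 0) _
        (fun a_ _ => rfl)
        (by rw [PySem.List.map_fst_enumerate]
            exact PySem.List.nodup_pyRange_one _ _)]
      rw [show (PySem.Dict.empty : PySem.Dict Int Int).items = [] from rfl, List.nil_append]
      rw [show (fun a : Int × List Int => ((fun q : Int × List Int => q.1) a, (fun q : Int × List Int => PySem.List.pyGetD q.2 0 0) a)) = (fun a : Int × List Int => (a.1, PySem.List.pyGetD a.2 0 0)) from rfl]
      rw [enumerate_map_head, hHeads]
    refine congrArg₂ Prod.mk ?_ ?_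
    · apply List.map_congr_left
      intro line hline
      have hmd : ∀ c : Int, c ∈ (l0 :: rest).flatMap (gPair a b) → c ∈ p :: dt := by
        intro c hc
        rw [← hd, PySem.List.mem_sorted, PySem.Set.mem_ofList]
        exact hc
      have hma : PySem.List.pyGetD line a 0 ∈ p :: dt :=
        hmd _ (List.mem_flatMap.mpr ⟨line, hline, by simp [gPair]⟩)
      have hmb : PySem.List.pyGetD line b 0 ∈ p :: dt :=
        hmd _ (List.mem_flatMap.mpr ⟨line, hline, by simp [gPair]⟩)
      rw [lookup_eq t p dt hdpw _ _ _ hEM hEMI hV2I _ hma,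
        lookup_eq t p dt hdpw _ _ _ hEM hEMI hV2I _ hmb]
    · rw [hIND, hI2E]

-- ===== VERDICT (by name: the statement is the Claim_ definition above) =====
theorem table_line_cor_spec : Claim_equal_table_line_cor := by
  intro lines axis interval hdom hpre
  unfold Spec_table_line_cor
  by_cases hax : axis = "col"
  · subst hax
    exact master lines interval 1 3
  · show table_line_cor lines axis interval = table_line_cor_alt lines axis interval
    simp only [table_line_cor, table_line_cor_alt, hax]
    exact master lines interval 0 2
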